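-- pv_equiv track=rewrite | github.com/adithyaka3/Noisy-Wordle | strategies/pomcp.py | pack_tuple_to_int
-- ===== SOURCE A (Python) =====
-- def pack_tuple_to_int(fb_tuple):
--     packed = 0
--     mult = 1
--     word_len = len(fb_tuple)
--     for i in range(word_len):
--         packed += fb_tuple[i] * mult
--         mult *= 3
--     return packed
-- ===== SOURCE B (Python) =====
-- def pack_tuple_to_int(fb_tuple):
--     packed = 0
--     for d in reversed(fb_tuple):
--         packed = packed * 3 + d
--     return packed
-- ===== Notes on version B (the rewrite author's own statement) =====
-- stated objective: idiomatic
-- what changed: Replaces the forward index loop with a separate power-of-3 accumulator by Horner's method over the digits in reverse order, keeping a single accumulator and no indexing.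
import Mathlib
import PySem

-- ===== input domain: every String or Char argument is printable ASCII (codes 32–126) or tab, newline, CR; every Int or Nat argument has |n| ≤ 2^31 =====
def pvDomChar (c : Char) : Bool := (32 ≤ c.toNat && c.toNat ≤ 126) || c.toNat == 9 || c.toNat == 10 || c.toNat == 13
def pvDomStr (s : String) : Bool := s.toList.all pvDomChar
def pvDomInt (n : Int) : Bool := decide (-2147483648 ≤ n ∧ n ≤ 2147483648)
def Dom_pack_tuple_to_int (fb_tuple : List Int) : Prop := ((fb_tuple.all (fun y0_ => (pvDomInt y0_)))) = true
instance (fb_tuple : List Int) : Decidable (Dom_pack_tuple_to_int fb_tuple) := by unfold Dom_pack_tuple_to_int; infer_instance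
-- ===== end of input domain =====

-- ===== PORT A =====
-- B packs the base-3 digits with Horner's method over the reversed list instead of a
-- forward index loop with a power accumulator; same return value, idiomatic rewrite.
def pack_tuple_to_int (fb_tuple : List Int) : Int :=
  let word_len : Int := (fb_tuple.length : Int)
  (PySem.List.pyRange 0 word_len 1).foldl
    (fun (s : Int × Int) i => (s.1 + (PySem.List.pyGetD fb_tuple i 0) * s.2, s.2 * 3))
    (0, 1) |>.1

-- ===== PORT B =====
def pack_tuple_to_int_alt (fb_tuple : List Int) : Int :=
  fb_tuple.reverse.foldl (fun packed d => packed * 3 + d) 0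

-- ===== PRECONDITION & SPEC =====
def Spec_pack_tuple_to_int (fb_tuple : List Int) (out : Int) : Prop := out = pack_tuple_to_int_alt fb_tuple
instance (fb_tuple : List Int) (out : Int) : Decidable (Spec_pack_tuple_to_int fb_tuple out) := by unfold Spec_pack_tuple_to_int; infer_instance

-- ===== CLAIM (what is proved, stated in full; the proofs are below) =====
def Claim_equal_pack_tuple_to_int : Prop := ∀ (fb_tuple : List Int), Dom_pack_tuple_to_int fb_tuple → Spec_pack_tuple_to_int fb_tuple (pack_tuple_to_int fb_tuple)

-- ===== LEMMAS AND PROOFS =====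

-- ===== VERDICT (by name: the statement is the Claim_ definition above) =====
lemma pack_loop_eq (fb_tuple : List Int) (p m : Int) :
    (fb_tuple.foldl (fun (s : Int × Int) d => (s.1 + d * s.2, s.2 * 3)) (p, m)).1
      = p + m * fb_tuple.foldr (fun d a => a * 3 + d) 0 := by
  induction fb_tuple generalizing p m with
  | nil => simp
  | cons d xs ih => simp [List.foldl_cons, ih]; ring

theorem pack_tuple_to_int_spec : Claim_equal_pack_tuple_to_int := by
  intro fb _
  unfold Spec_pack_tuple_to_int pack_tuple_to_int pack_tuple_to_int_alt
  dsimp only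
  rw [PySem.List.foldl_pyRange_zero_pyGetD' fb 0
      (fun (s : Int × Int) d => (s.1 + d * s.2, s.2 * 3)) (0, 1)]
  rw [List.foldl_reverse, pack_loop_eq]
  ring
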